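-- pv_equiv track=rewrite | github.com/white-prog/python-codes | filesize.py | toByte
-- ===== SOURCE A (Python) =====
-- def toByte(data_size,data_type):
--     #we can use dictionary instead then programme become more efficient we don't need to use loop then
--     list_of_bytes = [
--     ('KB', 1024),
--     ('MB', 1048576),
--     ('GB', 1073741824),
--     ('TB', 1099511627776),
--     ('PB', 1125899906842624),
--     ('EB', 1152921504606846976),
--     ('ZB', 1180591620717411303424),
--     ('YB', 1208925819614629174706176)
--     ]
--     how_much = 0
--     for i in list_of_bytes:
--         if i[0] == data_type.upper():
--             how_much = i[1]
--             break
--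
--     return str(data_size * how_much) + " bytes"
-- ===== SOURCE B (Python) =====
-- def toByte(data_size, data_type):
--     # Decode the unit structurally: a valid unit is <letter>B where the letter's
--     # position in the magnitude alphabet "KMGTPEZY" gives the power of 1024.
--     u = data_type.upper()
--     multiplier = 0
--     if len(u) == 2 and u[1] == 'B':
--         pos = "KMGTPEZY".find(u[0])
--         if pos != -1:
--             multiplier = 1024 ** (pos + 1)
--     return str(data_size * multiplier) + " bytes"
-- ===== Notes on version B (the rewrite author's own statement) =====
-- stated objective: alternative
-- what changed: Replaces A's scan over a precomputed (unit, constant) table by structural decoding of the unit string itself: check the shape <letter>+'B', find the letter's position in the magnitude alphabet "KMGTPEZY", and compute the multiplier as the closed form 1024**(pos+1); no table of units or constants exists in B.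
import Mathlib
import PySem

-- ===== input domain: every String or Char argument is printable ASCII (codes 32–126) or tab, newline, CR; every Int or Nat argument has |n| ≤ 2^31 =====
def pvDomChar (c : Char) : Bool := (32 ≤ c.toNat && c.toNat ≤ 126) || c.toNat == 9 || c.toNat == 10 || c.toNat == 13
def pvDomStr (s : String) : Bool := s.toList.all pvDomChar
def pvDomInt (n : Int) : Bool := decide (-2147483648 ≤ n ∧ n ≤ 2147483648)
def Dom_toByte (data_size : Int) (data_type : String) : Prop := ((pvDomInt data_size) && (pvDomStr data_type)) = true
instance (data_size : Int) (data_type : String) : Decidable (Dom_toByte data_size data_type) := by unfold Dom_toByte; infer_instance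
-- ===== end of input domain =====

-- B drops A's (unit, constant) table and scan entirely: it decodes the unit string
-- structurally (<letter> + 'B', letter's position in "KMGTPEZY" gives the power of 1024)
-- and computes the multiplier as 1024^(pos+1) (alternative decomposition, same cost).


-- ===== PORT A =====
-- A's constant table, in order
def listOfBytes : List (String × Int) :=
  [("KB", 1024), ("MB", 1048576), ("GB", 1073741824), ("TB", 1099511627776),
   ("PB", 1125899906842624), ("EB", 1152921504606846976),
   ("ZB", 1180591620717411303424), ("YB", 1208925819614629174706176)]

-- A's for-loop with break: first matching entry's value, else the initial 0
def toByteScan (dt : String) : List (String × Int) → Int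
  | [] => 0
  | i :: rest => if i.1 == dt then i.2 else toByteScan dt rest

def toByte (data_size : Int) (data_type : String) : String :=
  PySem.Int.toStr (data_size * toByteScan (PySem.Str.upper data_type) listOfBytes) ++ " bytes"

-- ===== PORT B =====
-- B's multiplier: len(u)==2 and u[1]=='B' (the two-char-ending-in-'B' shape test),
-- then "KMGTPEZY".find(u[0]) and the closed form 1024**(pos+1); 0 otherwise.
def altMult (u : List Char) : Int :=
  match u with
  | [c, 'B'] =>
    let pos := PySem.Chars.find "KMGTPEZY".toList [c]
    if pos ≠ -1 then (1024 : Int) ^ (pos.toNat + 1) else 0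
  | _ => 0

def toByte_alt (data_size : Int) (data_type : String) : String :=
  let u := PySem.Str.upper data_type
  PySem.Int.toStr (data_size * altMult u.toList) ++ " bytes"

-- ===== PRECONDITION & SPEC =====
def Spec_toByte (data_size : Int) (data_type : String) (out : String) : Prop := out = toByte_alt data_size data_type
instance (data_size : Int) (data_type : String) (out : String) : Decidable (Spec_toByte data_size data_type out) := by unfold Spec_toByte; infer_instance

-- ===== CLAIM (what is proved, stated in full; the proofs are below) =====
def Claim_equal_toByte : Prop := ∀ (data_size : Int) (data_type : String), Dom_toByte data_size data_type → Spec_toByte data_size data_type (toByte data_size data_type)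

-- ===== LEMMAS AND PROOFS =====

theorem singleton_infix_iff_mem (a : Char) (l : List Char) : [a] <:+: l ↔ a ∈ l :=
  ⟨fun h => List.singleton_sublist.mp h.sublist, fun h => by
    obtain ⟨s, t, rfl⟩ := List.append_of_mem h
    exact ⟨s, t, by simp⟩⟩

-- the heart of the equivalence: the table scan equals the structural decoding
theorem scan_eq_altMult (u : String) : toByteScan u listOfBytes = altMult u.toList := by
  obtain ⟨l, rfl⟩ : ∃ l, u = String.ofList l := ⟨u.toList, by simp⟩
  match l with
  | [] => decide
  | [c] =>
    simp only [toByteScan, listOfBytes, beq_iff_eq, ← String.toList_inj]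
    simp [altMult]
  | (c :: d :: e :: rest) =>
    simp only [toByteScan, listOfBytes, beq_iff_eq, ← String.toList_inj]
    simp [altMult]
  | [c, d] =>
    by_cases hd : d = 'B'
    · subst hd
      by_cases hK : 'K' = c; · subst hK; decide
      by_cases hM : 'M' = c; · subst hM; decide
      by_cases hG : 'G' = c; · subst hG; decide
      by_cases hT : 'T' = c; · subst hT; decide
      by_cases hP : 'P' = c; · subst hP; decide
      by_cases hE : 'E' = c; · subst hE; decide
      by_cases hZ : 'Z' = c; · subst hZ; decide
      by_cases hY : 'Y' = c; · subst hY; decide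
      -- letter not in the alphabet: scan finds nothing; find returns -1
      have hfind : PySem.Chars.find ['K','M','G','T','P','E','Z','Y'] [c] = -1 := by
        rw [show (['K','M','G','T','P','E','Z','Y'] : List Char) = "KMGTPEZY".toList from rfl]
        rw [PySem.Chars.find_eq_neg_one_iff, singleton_infix_iff_mem]
        simp only [show ("KMGTPEZY" : String).toList = ['K','M','G','T','P','E','Z','Y'] from rfl]
        simp only [List.mem_cons, List.not_mem_nil, or_false]
        rintro (h|h|h|h|h|h|h|h) <;> simp_all
      simp only [toByteScan, listOfBytes, beq_iff_eq, ← String.toList_inj]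
      simp [altMult, hfind, hK, hM, hG, hT, hP, hE, hZ, hY]
    · -- second character is not 'B': no table entry matches, and B's shape test fails
      simp only [toByteScan, listOfBytes, beq_iff_eq, ← String.toList_inj]
      simp only [String.toList_ofList]
      have hd' : ¬ ('B' = d) := fun h => hd h.symm
      rw [show altMult [c, d] = 0 from by
        unfold altMult; split
        · rename_i h; injection h with _ h2; injection h2 with h2; exact absurd h2 hd
        · rfl]
      simp [hd']

-- ===== VERDICT (by name: the statement is the Claim_ definition above) =====
theorem toByte_spec : Claim_equal_toByte := by
  intro ds dt _
  unfold Spec_toByte toByte toByte_alt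
  rw [scan_eq_altMult]
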